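-- pv_equiv track=rewrite | github.com/gael-mehdi/Optimisation-surveillance-problem | sol.py | place_guards
-- ===== SOURCE A (Python) =====
-- def place_guards(grid):
--     guards = []
--     rows = len(grid)
--     columns = len(grid[0])
--     for x in range(rows):
--         for y in range(columns):
--             if grid[x][y] == 'CIBLE':
--                 for i in range(y, columns):
--                     if grid[x][i] == 'OBSTACLE':
--                         break
--                     grid[x][i] = True
--                 for i in range(y, -1, -1):
--                     if grid[x][i] == 'OBSTACLE':
--                         break
--                     grid[x][i] = True
--                 guards.append((x, y))
--     return guards
-- ===== SOURCE B (Python) =====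
-- def place_guards(grid):
--     # One pass per row with a seen-a-target-in-this-run flag, instead of A's
--     # mark-cells-True-and-rescan. Return-value equivalent to A; unlike A, it
--     # does not mutate grid in place.
--     columns = len(grid[0])
--     guards = []
--     for x, row in enumerate(grid):
--         seen = False
--         for y in range(columns):
--             cell = row[y]
--             if cell == 'OBSTACLE':
--                 seen = False
--             elif cell == 'CIBLE' and not seen:
--                 seen = True
--                 guards.append((x, y))
--     return guards
-- ===== Notes on version B (the rewrite author's own statement) =====
-- stated objective: simpler
-- what changed: replaces A's mutate-the-grid trick (mark every cell of a target's run True and rescan) with a single left-to-right pass per row keeping a seen-target-in-current-run flag, no nested marking loops and no mutation of grid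
import Mathlib
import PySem

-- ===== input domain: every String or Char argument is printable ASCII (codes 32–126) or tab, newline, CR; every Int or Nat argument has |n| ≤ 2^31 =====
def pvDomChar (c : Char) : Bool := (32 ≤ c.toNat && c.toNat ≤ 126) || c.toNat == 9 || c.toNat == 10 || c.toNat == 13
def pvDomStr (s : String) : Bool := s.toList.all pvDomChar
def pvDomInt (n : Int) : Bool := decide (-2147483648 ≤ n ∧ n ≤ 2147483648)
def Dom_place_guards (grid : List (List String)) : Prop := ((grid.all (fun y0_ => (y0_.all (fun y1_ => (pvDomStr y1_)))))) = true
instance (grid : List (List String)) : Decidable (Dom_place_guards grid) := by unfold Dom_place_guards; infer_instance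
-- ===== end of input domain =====

-- B does the job in one pass per row with a seen-target-in-current-run flag instead of
-- A's mutate-and-rescan; equivalence is about the RETURN value only (Python A mutates
-- grid in place, B does not).

-- ===== PORT A =====
-- Python A sets visited cells to the Boolean True; only comparisons with "CIBLE" /
-- "OBSTACLE" ever read a cell, so the port marks cells with "" (equal behaviour).
-- `for i in range(y, columns): if OBSTACLE: break; grid[x][i] = True`
def aMarkRight (row : List String) (i c : Nat) : List String :=
  if _h : i < c then
    if row.getD i "" = "OBSTACLE" then row
    else aMarkRight (row.set i "") (i + 1) c
  else row
termination_by c - i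

-- `for i in range(y, -1, -1): if OBSTACLE: break; grid[x][i] = True`
def aMarkLeft (row : List String) (i : Nat) : List String :=
  if row.getD i "" = "OBSTACLE" then row
  else
    match i with
    | 0 => row.set 0 ""
    | Nat.succ j => aMarkLeft (row.set (j + 1) "") j

-- inner `for y in range(columns)` loop of A, threading the mutated row
def aRow (row : List String) (y c : Nat) (x : Int) : List (Int × Int) :=
  if _h : y < c then
    if row.getD y "" = "CIBLE" then
      (x, (y : Int)) :: aRow (aMarkLeft (aMarkRight row y c) y) (y + 1) c x
    else aRow row (y + 1) c x
  else []
termination_by c - y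

def place_guards (grid : List (List String)) : List (Int × Int) :=
  (grid.foldl (fun (st : Int × List (Int × Int)) row =>
      (st.1 + 1, st.2 ++ aRow row 0 (grid.headD []).length st.1)) (0, [])).2

-- ===== PORT B =====
-- inner `for y in range(columns)` loop of B, threading the `seen` flag
def bRow (row : List String) (y c : Nat) (x : Int) (seen : Bool) : List (Int × Int) :=
  if _h : y < c then
    let cell := row.getD y ""
    if cell = "OBSTACLE" then bRow row (y + 1) c x false
    else if cell = "CIBLE" ∧ seen = false then
      (x, (y : Int)) :: bRow row (y + 1) c x true
    else bRow row (y + 1) c x seen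
  else []
termination_by c - y

def place_guards_alt (grid : List (List String)) : List (Int × Int) :=
  (grid.foldl (fun (st : Int × List (Int × Int)) row =>
      (st.1 + 1, st.2 ++ bRow row 0 (grid.headD []).length st.1 false)) (0, [])).2

-- ===== PRECONDITION & SPEC =====
-- Pre_ excludes exactly the inputs where the Python A raises IndexError (empty grid,
-- or a row shorter than row 0); the Python B raises there too.
def Pre_place_guards (grid : List (List String)) : Prop :=
  grid ≠ [] ∧ ∀ row ∈ grid, (grid.headD []).length ≤ row.length
instance (grid : List (List String)) : Decidable (Pre_place_guards grid) := by
  unfold Pre_place_guards; infer_instance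

def pvWitness_place_guards : List (List String) := [["CIBLE", "x", "OBSTACLE", "CIBLE"]]

def Spec_place_guards (grid : List (List String)) (out : List (Int × Int)) : Prop := out = place_guards_alt grid
instance (grid : List (List String)) (out : List (Int × Int)) : Decidable (Spec_place_guards grid out) := by unfold Spec_place_guards; infer_instance

-- ===== CLAIM (what is proved, stated in full; the proofs are below) =====
def Claim_equal_place_guards : Prop := ∀ (grid : List (List String)), Dom_place_guards grid → Pre_place_guards grid → Spec_place_guards grid (place_guards grid)

-- ===== LEMMAS AND PROOFS =====

lemma getD_set_ne (row : List String) (a j : Nat) (h : a ≠ j) :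
    (row.set a "").getD j "" = row.getD j "" := by
  simp [List.getD, List.getElem?_set_ne h]

lemma getD_set_self (row : List String) (a : Nat) :
    (row.set a "").getD a "" = "" := by
  by_cases h : a < row.length
  · simp [List.getD, List.getElem?_set_self h]
  · rw [List.set_eq_of_length_le (by omega)]
    simp [List.getD, List.getElem?_eq_none (l := row) (i := a) (by omega)]

lemma aMarkLeft_getD_gt : ∀ (i : Nat) (row : List String) (j : Nat), i < j →
    (aMarkLeft row i).getD j "" = row.getD j "" := by
  intro i
  induction i with
  | zero =>
    intro row j hj
    unfold aMarkLeft
    split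
    · rfl
    · exact getD_set_ne row 0 j (by omega)
  | succ k ih =>
    intro row j hj
    unfold aMarkLeft
    split
    · rfl
    · rw [ih _ j (by omega), getD_set_ne row (k + 1) j (by omega)]

lemma aMarkRight_getD_lt : ∀ (n i c : Nat) (row : List String) (j : Nat), c - i ≤ n → j < i →
    (aMarkRight row i c).getD j "" = row.getD j "" := by
  intro n
  induction n with
  | zero =>
    intro i c row j hn hj
    unfold aMarkRight
    split
    · omega
    · rfl
  | succ k ih =>
    intro i c row j hn hj
    unfold aMarkRight
    split
    · split
      · rfl
      · rw [ih (i + 1) c _ j (by omega) (by omega), getD_set_ne row i j (by omega)]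
    · rfl

/-- Characterization of the right-marking loop: there is a stop index `m`;
cells in `[i, m)` are marked `""` and were not obstacles; from `m` on, nothing changed;
if `m < c` the stop was an obstacle. -/
lemma aMarkRight_spec : ∀ (n i c : Nat) (row : List String), c - i ≤ n →
    ∃ m, i ≤ m ∧
      (m < c → (aMarkRight row i c).getD m "" = "OBSTACLE" ∧ row.getD m "" = "OBSTACLE") ∧
      (∀ j, i ≤ j → j < m → j < c →
        (aMarkRight row i c).getD j "" = "" ∧ row.getD j "" ≠ "OBSTACLE") ∧
      (∀ j, m ≤ j → (aMarkRight row i c).getD j "" = row.getD j "") := by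
  intro n
  induction n with
  | zero =>
    intro i c row hn
    refine ⟨i, le_rfl, fun h => absurd h (by omega),
      fun j h1 h2 h3 => absurd h2 (by omega), fun j hj => ?_⟩
    unfold aMarkRight
    rw [dif_neg (by omega)]
  | succ k ih =>
    intro i c row hn
    by_cases hic : i < c
    · by_cases hob : row.getD i "" = "OBSTACLE"
      · refine ⟨i, le_rfl, ?_, ?_, ?_⟩
        · intro _
          constructor
          · unfold aMarkRight; rw [dif_pos hic, if_pos hob]; exact hob
          · exact hob
        · intro j h1 h2 _; omega
        · intro j _; unfold aMarkRight; rw [dif_pos hic, if_pos hob]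
      · obtain ⟨m, hm1, hm2, hm3, hm4⟩ := ih (i + 1) c (row.set i "") (by omega)
        have heq : aMarkRight row i c = aMarkRight (row.set i "") (i + 1) c := by
          conv_lhs => rw [aMarkRight]
          rw [dif_pos hic, if_neg hob]
        refine ⟨m, by omega, ?_, ?_, ?_⟩
        · intro hmc
          obtain ⟨h5, h6⟩ := hm2 hmc
          rw [heq]
          exact ⟨h5, by rw [← getD_set_ne row i m (by omega)]; exact h6⟩
        · intro j h1 h2 h3
          rw [heq]
          by_cases hji : j = i
          · subst hji
            refine ⟨?_, hob⟩
            rw [aMarkRight_getD_lt k (j + 1) c _ j (by omega) (by omega)]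
            exact getD_set_self row j
          · obtain ⟨h5, h6⟩ := hm3 j (by omega) h2 h3
            exact ⟨h5, by rw [← getD_set_ne row i j (by omega)]; exact h6⟩
        · intro j hj
          rw [heq, hm4 j hj, getD_set_ne row i j (by omega)]
    · refine ⟨i, le_rfl, ?_, ?_, ?_⟩
      · intro hmc; exact absurd hmc hic
      · intro j h1 h2 h3; omega
      · intro j hj
        unfold aMarkRight
        rw [dif_neg hic]

/-- The simulation condition relating A's mutated row state (with `seen = true`: a stop
index `m`) to B's original row and flag. -/
def SimCond (rowA rowB : List String) (y c : Nat) (seen : Bool) (m : Nat) : Prop :=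
  match seen with
  | false => ∀ j, y ≤ j → j < c → rowA.getD j "" = rowB.getD j ""
  | true =>
      y ≤ m ∧
      (m < c → rowA.getD m "" = "OBSTACLE" ∧ rowB.getD m "" = "OBSTACLE") ∧
      (∀ j, y ≤ j → j < m → j < c → rowA.getD j "" = "" ∧ rowB.getD j "" ≠ "OBSTACLE") ∧
      (∀ j, m ≤ j → j < c → rowA.getD j "" = rowB.getD j "")

lemma main_sim : ∀ (n : Nat) (c : Nat) (x : Int) (y : Nat) (rowA rowB : List String)
    (seen : Bool) (m : Nat), c - y ≤ n → SimCond rowA rowB y c seen m →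
    aRow rowA y c x = bRow rowB y c x seen := by
  intro n
  induction n with
  | zero =>
    intro c x y rowA rowB seen m hn _
    unfold aRow bRow
    rw [dif_neg (by omega), dif_neg (by omega)]
  | succ k ih =>
    intro c x y rowA rowB seen m hn hsim
    by_cases hyc : y < c
    · cases seen with
      | false =>
        have hag : ∀ j, y ≤ j → j < c → rowA.getD j "" = rowB.getD j "" := hsim
        have hy : rowA.getD y "" = rowB.getD y "" := hag y le_rfl hyc
        unfold aRow bRow
        rw [dif_pos hyc, dif_pos hyc]
        by_cases hob : rowB.getD y "" = "OBSTACLE"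
        · rw [if_pos hob, if_neg (by rw [hy, hob]; decide)]
          exact ih c x (y + 1) rowA rowB false 0 (by omega)
            (fun j h1 h2 => hag j (by omega) h2)
        · rw [if_neg hob]
          by_cases hcb : rowB.getD y "" = "CIBLE"
          · rw [if_pos (And.intro hcb rfl), if_pos (hy.trans hcb)]
            congr 1
            -- A marks the run; relate the marked row to rowB with stop index m'
            obtain ⟨m', hm1, hm2, hm3, hm4⟩ := aMarkRight_spec (c - y) y c rowA le_rfl
            have hmy : y < m' := by
              rcases Nat.lt_or_ge y m' with h | h
              · exact h
              · exfalso
                have : m' = y := by omega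
                subst this
                have := (hm2 hyc).2
                rw [hy, hcb] at this
                exact absurd this (by decide)
            refine ih c x (y + 1) (aMarkLeft (aMarkRight rowA y c) y) rowB true m'
              (by omega) ⟨by omega, ?_, ?_, ?_⟩
            · intro hmc
              obtain ⟨h5, h6⟩ := hm2 hmc
              rw [aMarkLeft_getD_gt y _ m' hmy]
              exact ⟨h5, by rw [← hag m' (by omega) hmc]; exact h6⟩
            · intro j h1 h2 h3
              rw [aMarkLeft_getD_gt y _ j (by omega)]
              obtain ⟨h5, h6⟩ := hm3 j (by omega) h2 h3
              exact ⟨h5, by rw [← hag j (by omega) h3]; exact h6⟩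
            · intro j h1 h2
              rw [aMarkLeft_getD_gt y _ j (by omega), hm4 j h1]
              exact hag j (by omega) h2
          · rw [if_neg (show ¬(rowA.getD y "" = "CIBLE") from fun h => hcb (hy.symm.trans h)),
              if_neg (show ¬(rowB.getD y "" = "CIBLE" ∧ (false = false)) from fun h => hcb h.1)]
            exact ih c x (y + 1) rowA rowB false 0 (by omega)
              (fun j h1 h2 => hag j (by omega) h2)
      | true =>
        obtain ⟨hm1, hm2, hm3, hm4⟩ := hsim
        unfold aRow bRow
        rw [dif_pos hyc, dif_pos hyc]
        by_cases hym : y < m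
        · obtain ⟨h5, h6⟩ := hm3 y le_rfl hym hyc
          rw [if_neg (by rw [h5]; decide), if_neg h6,
            if_neg (by rintro ⟨-, h⟩; exact absurd h (by decide))]
          refine ih c x (y + 1) rowA rowB true m (by omega)
            ⟨by omega, hm2, fun j h1 h2 h3 => hm3 j (by omega) h2 h3,
             fun j h1 h2 => hm4 j h1 h2⟩
        · have hym' : y = m := by omega
          subst hym'
          obtain ⟨h5, h6⟩ := hm2 hyc
          rw [if_neg (by rw [h5]; decide), if_pos h6]
          exact ih c x (y + 1) rowA rowB false 0 (by omega)
            (fun j h1 h2 => hm4 j (by omega) h2)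
    · unfold aRow bRow
      rw [dif_neg hyc, dif_neg hyc]

lemma row_eq (row : List String) (c : Nat) (x : Int) :
    aRow row 0 c x = bRow row 0 c x false :=
  main_sim c c x 0 row row false 0 le_rfl (fun _ _ _ => rfl)

-- ===== VERDICT (by name: the statement is the Claim_ definition above) =====
theorem place_guards_spec : Claim_equal_place_guards := by
  intro grid _ _
  unfold Spec_place_guards place_guards place_guards_alt
  simp only [row_eq]
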